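-- pv_equiv track=rewrite | github.com/kszeto20/CS1_F22 | Homework/6hw/hw6_sol.py | desLengths
-- ===== SOURCE A (Python) =====
-- def desLengths(length, wList):
--     corrLengths = []
--
--     wSet = set()
--
--     for word in wList:
--         wSet.add(word)
--
--     for word in wSet:
--         if len(word) == length:
--             corrLengths.append(word)
--     corrLengths.sort()
--
--     return corrLengths
-- ===== SOURCE B (Python) =====
-- def desLengths(length, wList):
--     matches = [w for w in wList if len(w) == length]
--     matches.sort()
--     out = []
--     for w in matches:
--         if not out or out[-1] != w:
--             out.append(w)
--     return out
-- ===== Notes on version B (the rewrite author's own statement) =====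
-- stated objective: alternative
-- what changed: Replaces the hash-set dedup (build set, filter, sort) by sort-then-adjacent-scan: filter keeping duplicates, sort, then one pass appending each word only when it differs from the last appended one; no set is used.
import Mathlib
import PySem

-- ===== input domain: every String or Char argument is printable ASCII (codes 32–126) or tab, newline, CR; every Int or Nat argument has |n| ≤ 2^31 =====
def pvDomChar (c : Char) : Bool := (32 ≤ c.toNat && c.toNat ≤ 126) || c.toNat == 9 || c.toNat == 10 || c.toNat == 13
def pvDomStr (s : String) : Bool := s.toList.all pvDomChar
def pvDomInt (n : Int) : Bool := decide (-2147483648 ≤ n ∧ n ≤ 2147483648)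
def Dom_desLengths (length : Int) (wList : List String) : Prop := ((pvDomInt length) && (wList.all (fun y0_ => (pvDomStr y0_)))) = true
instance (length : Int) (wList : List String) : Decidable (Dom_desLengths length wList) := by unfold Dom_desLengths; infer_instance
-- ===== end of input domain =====

-- B replaces A's hash-set dedup by filter-then-sort-then-adjacent-scan dedup; objective: alternative (same cost).

-- ===== PORT A =====
def desLengths (length : Int) (wList : List String) : List String :=
  let wSet : PySem.Set String := wList.foldl PySem.Set.add PySem.Set.empty
  let corrLengths : List String :=
    wSet.foldl (fun acc word => if PySem.Str.len word = length then acc ++ [word] else acc) []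
  PySem.List.sorted corrLengths (fun x => x)

-- ===== PORT B =====
def desLengths_alt (length : Int) (wList : List String) : List String :=
  let matchList : List String := wList.filter (fun w => decide (PySem.Str.len w = length))
  let s := PySem.List.sorted matchList (fun x => x)
  s.foldl (fun out w => if out = [] ∨ out.getLast? ≠ some w then out ++ [w] else out) []

-- ===== PRECONDITION & SPEC =====
def Spec_desLengths (length : Int) (wList : List String) (out : List String) : Prop := out = desLengths_alt length wList
instance (length : Int) (wList : List String) (out : List String) : Decidable (Spec_desLengths length wList out) := by unfold Spec_desLengths; infer_instance

-- ===== CLAIM (what is proved, stated in full; the proofs are below) =====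
def Claim_equal_desLengths : Prop := ∀ (length : Int) (wList : List String), Dom_desLengths length wList → Spec_desLengths length wList (desLengths length wList)

-- ===== LEMMAS AND PROOFS =====

-- A's filter loop over the set, as a List.filter
theorem loopA_eq (len : Int) (s : List String) (acc : List String) :
    s.foldl (fun acc word => if PySem.Str.len word = len then acc ++ [word] else acc) acc
      = acc ++ s.filter (fun w => decide (PySem.Str.len w = len)) := by
  have h := PySem.List.foldl_append_if (fun w => decide (PySem.Str.len w = len)) id s acc
  simpa using h

-- B's adjacent-dedup scan, once the accumulator is nonempty with last element m
def dedupTail (m : String) : List String → List String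
  | [] => []
  | x :: xs => if x = m then dedupTail m xs else x :: dedupTail x xs

theorem foldB_eq (s : List String) (acc : List String) (m : String)
    (h : acc.getLast? = some m) :
    s.foldl (fun out w => if out = [] ∨ out.getLast? ≠ some w then out ++ [w] else out) acc
      = acc ++ dedupTail m s := by
  induction s generalizing acc m with
  | nil => simp [dedupTail]
  | cons x xs ih =>
    have hne : acc ≠ [] := by intro hn; simp [hn] at h
    by_cases hxm : x = m
    · subst hxm
      rw [List.foldl_cons]
      rw [if_neg (by simp [hne, h])]
      rw [ih acc x h]
      simp [dedupTail]
    · rw [List.foldl_cons]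
      rw [if_pos (Or.inr (by rw [h]; exact fun e => hxm (Option.some.inj e).symm))]
      rw [ih (acc ++ [x]) x (by simp)]
      simp [dedupTail, hxm]

theorem dedupTail_props (s : List String) (m : String)
    (hs : s.Pairwise (· ≤ ·)) (hm : ∀ y ∈ s, m ≤ y) :
    (m :: dedupTail m s).Pairwise (· < ·) ∧ ∀ a, (a ∈ m :: dedupTail m s ↔ a = m ∨ a ∈ s) := by
  induction s generalizing m with
  | nil => simp [dedupTail]
  | cons x xs ih =>
    have hxs : xs.Pairwise (· ≤ ·) := hs.tail
    have hx : ∀ y ∈ xs, x ≤ y := by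
      intro y hy; exact (List.pairwise_cons.mp hs).1 y hy
    by_cases hxm : x = m
    · subst hxm
      obtain ⟨h1, h2⟩ := ih x hxs hx
      refine ⟨by simpa [dedupTail] using h1, ?_⟩
      intro a
      have := h2 a
      simp [dedupTail] at this ⊢
      tauto
    · have hmx : m < x := lt_of_le_of_ne (hm x (by simp)) (fun e => hxm e.symm)
      obtain ⟨h1, h2⟩ := ih x hxs hx
      constructor
      · rw [show dedupTail m (x :: xs) = x :: dedupTail x xs from by simp [dedupTail, hxm]]
        refine List.pairwise_cons.mpr ⟨?_, h1⟩
        intro b hb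
        rcases (h2 b).mp hb with hbx | hbxs
        · exact hbx ▸ hmx
        · exact lt_of_lt_of_le hmx (hx b hbxs)
      · intro a
        have := h2 a
        simp [dedupTail, hxm] at this ⊢
        tauto

-- ===== VERDICT (by name: the statement is the Claim_ definition above) =====
theorem desLengths_spec : Claim_equal_desLengths := by
  intro length wList _
  unfold Spec_desLengths
  show desLengths length wList = desLengths_alt length wList
  simp only [desLengths, desLengths_alt, PySem.Set.empty]
  rw [← PySem.Set.ofList_eq_foldl, loopA_eq, List.nil_append]
  set p : String → Bool := fun w => decide (PySem.Str.len w = length) with hp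
  set F : List String := wList.filter p with hF
  -- filter of ofList is a permutation of ofList of filter
  have hperm1 : ((PySem.Set.ofList wList).filter p).Perm (PySem.Set.ofList F) := by
    rw [List.perm_ext_iff_of_nodup ((PySem.Set.nodup_ofList wList).filter p)
        (PySem.Set.nodup_ofList F)]
    intro a
    simp [PySem.Set.mem_ofList, hF, List.mem_filter]
  rw [PySem.List.sorted_eq_sorted_of_perm _ _ (fun x => x) (fun _ _ h => h) hperm1]
  -- B-side
  cases hsF : PySem.List.sorted F (fun x => x) with
  | nil =>
    have hFnil : F = [] := by
      by_contra hne
      obtain ⟨y, hy⟩ := List.exists_mem_of_ne_nil F hne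
      have hmem := (PySem.List.mem_sorted F (fun x => x) false y).mpr hy
      rw [hsF] at hmem
      simp at hmem
    rw [hFnil]
    rfl
  | cons m t =>
    have hpw : (m :: t).Pairwise (fun a b => a ≤ b) := by
      have := PySem.List.sorted_pairwise F (fun x => x)
      rwa [hsF] at this
    have hmle : ∀ y ∈ t, m ≤ y := (List.pairwise_cons.mp hpw).1
    obtain ⟨h1, h2⟩ := dedupTail_props t m hpw.tail hmle
    have hBfold : (m :: t).foldl
        (fun out w => if out = [] ∨ out.getLast? ≠ some w then out ++ [w] else out) []
        = m :: dedupTail m t := by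
      rw [List.foldl_cons, if_pos (Or.inl rfl)]
      simpa using foldB_eq t [m] m (by simp)
    rw [hBfold]
    apply PySem.List.sorted_eq_of_perm_of_pairwise_lt
    · rw [List.perm_ext_iff_of_nodup
        (List.Pairwise.imp (fun h => ne_of_lt h) h1) (PySem.Set.nodup_ofList F)]
      intro a
      rw [h2 a, PySem.Set.mem_ofList]
      have hmem : a ∈ F ↔ a ∈ m :: t := by
        rw [← hsF]; exact (PySem.List.mem_sorted F (fun x => x) false a).symm
      simp [hmem]
    · exact h1
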